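-- pv_equiv track=rewrite | github.com/tuetschek/Highlight_based_Summarization | Highlight_evaluation/get_summ_for_human_eva.py | eva_highlight
-- ===== SOURCE A (Python) =====
-- def label_classify(item):
--     if item[0] == '(':
--         if item[1] == 'F':
--             return "fact"
--         else:
--             return "phrase"
--     elif item[0] == ')':
--         return "end"
--     elif item[0] == '*':
--         return "reference"
--     return "token"
--
-- def eva_highlight(line):
--     tokens = [[] for i in enumerate(line)]; names = []
--     fact_name_stack = []
--     id_stack = []
--     type_stack = []
--     only_tokens = []
--     for i, item in enumerate(line):
--         l_type = label_classify(item)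
--         if l_type in ["fact", "phrase"]:
--             tokens[i].append("<strong>")
--             id_stack.append(i)
--             type_stack.append(l_type)
--             if l_type == "fact":
--                 fact_name_stack.append(item[1:])
--                 names.append(item[1:])
--             else:
--                 names.append(fact_name_stack[-1] + "|||" + item[1:])
--         elif l_type == "end":
--             pop_id = id_stack.pop()
--             tokens[pop_id].append("</strong>")
--             pop_type = type_stack.pop()
--             if pop_type == "fact":
--                 fact_name_stack.pop()
--             names.append("")
--         else:
--             if l_type == "reference":
--                 names.append("")
--             else:
--                 for j in range(len(tokens)):
--                     tokens[j].append(item)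
--                 names.append("")
--                 only_tokens.append(item)
--
--     ret_list = []; ret_name = []
--     for i, item in enumerate(tokens):
--         if names[i] != "":
--             ret_list.append(item)
--             ret_name.append(names[i])
--     return ret_list, ret_name, only_tokens
-- ===== SOURCE B (Python) =====
-- def eva_highlight(line):
--     only_tokens = []          # plain tokens in order
--     spans = []                # [start_pos, name, end_pos_or_None], in start order
--     stack = []                # (index into spans, is_fact)
--     facts = []                # open fact names
--     for item in line:
--         if item.startswith('('):
--             is_fact = item[1] == 'F'
--             name = item[1:] if is_fact else facts[-1] + '|||' + item[1:]
--             stack.append((len(spans), is_fact))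
--             spans.append([len(only_tokens), name, None])
--             if is_fact:
--                 facts.append(name)
--         elif item.startswith(')'):
--             idx, is_fact = stack.pop()
--             spans[idx][2] = len(only_tokens)
--             if is_fact:
--                 facts.pop()
--         elif item.startswith('*'):
--             pass
--         else:
--             only_tokens.append(item)
--     ret_list = []
--     ret_name = []
--     for s, name, e in spans:
--         if e is None:
--             ret_list.append(only_tokens[:s] + ['<strong>'] + only_tokens[s:])
--         else:
--             ret_list.append(only_tokens[:s] + ['<strong>'] + only_tokens[s:e]
--                             + ['</strong>'] + only_tokens[e:])
--         ret_name.append(name)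
--     return ret_list, ret_name, only_tokens
-- ===== Notes on version B (the rewrite author's own statement) =====
-- stated objective: faster
-- what changed: A appends every plain token to a separate per-position list for all line positions (quadratic bookkeeping) and filters afterwards; B makes one pass recording (start, name, end) spans plus the plain-token list and then builds each highlighted list by splicing <strong>/</strong> around slices of only_tokens.
import Mathlib
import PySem

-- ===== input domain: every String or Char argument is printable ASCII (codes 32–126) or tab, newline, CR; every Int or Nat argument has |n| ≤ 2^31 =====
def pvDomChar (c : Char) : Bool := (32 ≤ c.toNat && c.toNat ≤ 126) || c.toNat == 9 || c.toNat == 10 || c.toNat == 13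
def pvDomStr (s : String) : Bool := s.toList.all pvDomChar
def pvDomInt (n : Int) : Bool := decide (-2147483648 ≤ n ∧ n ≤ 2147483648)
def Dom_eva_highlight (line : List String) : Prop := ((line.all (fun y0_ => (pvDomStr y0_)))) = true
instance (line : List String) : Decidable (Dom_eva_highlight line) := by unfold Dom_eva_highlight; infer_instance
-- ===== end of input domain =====

-- B replaces A's Θ(n²) "append every plain token to a per-position list for every position"
-- bookkeeping by one pass that records (start, name, end) spans and splices each highlighted
-- list out of only_tokens afterwards (objective: faster; equal return values on Pre_).

-- ===== PORT A =====

-- label_classify(item); `none` = Python IndexError (item[0] on "" or item[1] on "(")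
def labelClassify (item : List Char) : Option String :=
  if h0 : item.length > 0 then
    if item[0]'h0 = '(' then
      if h1 : item.length > 1 then
        if item[1]'h1 = 'F' then some "fact" else some "phrase"
      else none
    else if item[0]'h0 = ')' then some "end"
    else if item[0]'h0 = '*' then some "reference"
    else some "token"
  else none

-- the main `for i, item in enumerate(line)` loop of A; stacks are head-first
-- (Python appends/pops at the right end; the head plays the role of the top).
-- On a path where Python raises (classify = none, pop of an empty stack,
-- fact_name_stack[-1] on empty) the loop stops and returns the current state (dead under Pre_).
def aLoop : List String → Nat → List (List String) → List String → List String → List Nat →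
    List String → List String → List (List String) × List String × List String
  | [], _, tokens, names, _, _, _, only => (tokens, names, only)
  | item :: rest, i, tokens, names, factS, idS, typeS, only =>
    match labelClassify item.toList with
    | none => (tokens, names, only)
    | some lt =>
      if lt = "fact" ∨ lt = "phrase" then
        let tokens' := tokens.modify i (· ++ ["<strong>"])
        let idS' := i :: idS
        let typeS' := lt :: typeS
        if lt = "fact" then
          let nm := String.ofList item.toList.tail   -- item[1:]
          aLoop rest (i+1) tokens' (names ++ [nm]) (nm :: factS) idS' typeS' only
        else
          match factS with
          | [] => (tokens', names, only)
          | f :: _ =>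
            let nm := f ++ "|||" ++ String.ofList item.toList.tail
            aLoop rest (i+1) tokens' (names ++ [nm]) factS idS' typeS' only
      else if lt = "end" then
        match idS, typeS with
        | popId :: idS', popTy :: typeS' =>
          let tokens' := tokens.modify popId (· ++ ["</strong>"])
          let factS' := if popTy = "fact" then factS.tail else factS
          aLoop rest (i+1) tokens' (names ++ [""]) factS' idS' typeS' only
        | _, _ => (tokens, names, only)
      else if lt = "reference" then
        aLoop rest (i+1) tokens (names ++ [""]) factS idS typeS only
      else
        aLoop rest (i+1) (tokens.map (· ++ [item])) (names ++ [""]) factS idS typeS (only ++ [item])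

-- the final `for i, item in enumerate(tokens): if names[i] != ""` selection loop
-- (names and tokens always have equal length when A returns)
def aSelect : List (List String) → List String → List (List String) × List String
  | [], _ => ([], [])
  | _ :: _, [] => ([], [])
  | t :: ts, n :: ns =>
    let r := aSelect ts ns
    if n ≠ "" then (t :: r.1, n :: r.2) else r

def eva_highlight (line : List String) : List (List String) × List String × List String :=
  let r := aLoop line 0 (line.map fun _ => ([] : List String)) [] [] [] [] []
  let s := aSelect r.1 r.2.1
  (s.1, s.2, r.2.2)

-- ===== PORT B =====

-- one pass: only_tokens, spans (start, name, end?) in start order, a stack of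
-- (span index, is_fact) and the open-fact-name stack; early return = Python raise (dead under Pre_)
def bLoop : List String → List String → List (Nat × String × Option Nat) → List (Nat × Bool) →
    List String → List String × List (Nat × String × Option Nat)
  | [], only, spans, _, _ => (only, spans)
  | item :: rest, only, spans, stack, facts =>
    match item.toList with
    | [] => bLoop rest (only ++ [item]) spans stack facts   -- "" is a plain token for B
    | c :: cs =>
      if c = '(' then
        match cs with
        | [] => (only, spans)                     -- item[1] raises IndexError
        | c1 :: cs1 =>
          if c1 = 'F' then
            let nm := String.ofList (c1 :: cs1)   -- item[1:]
            bLoop rest only (spans ++ [(only.length, nm, none)]) ((spans.length, true) :: stack) (nm :: facts)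
          else
            match facts with
            | [] => (only, spans)                 -- facts[-1] raises IndexError
            | f :: _ =>
              let nm := f ++ "|||" ++ String.ofList (c1 :: cs1)
              bLoop rest only (spans ++ [(only.length, nm, none)]) ((spans.length, false) :: stack) facts
      else if c = ')' then
        match stack with
        | [] => (only, spans)                     -- stack.pop raises IndexError
        | (idx, isF) :: stack' =>
          bLoop rest only (spans.modify idx (fun sp => (sp.1, sp.2.1, some only.length)))
            stack' (if isF then facts.tail else facts)
      else if c = '*' then bLoop rest only spans stack facts
      else bLoop rest (only ++ [item]) spans stack facts

-- only[:s] + ['<strong>'] + only[s:e] + ['</strong>'] + only[e:]  (no closing tag for an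
-- unclosed span); exact for the 0 ≤ s ≤ e ≤ len(only) slices B produces
def splice (only : List String) (sp : Nat × String × Option Nat) : List String :=
  match sp.2.2 with
  | none => only.take sp.1 ++ ["<strong>"] ++ only.drop sp.1
  | some e => only.take sp.1 ++ ["<strong>"] ++ ((only.drop sp.1).take (e - sp.1)) ++ ["</strong>"] ++ only.drop e

def eva_highlight_alt (line : List String) : List (List String) × List String × List String :=
  let r := bLoop line [] [] [] []
  (r.2.map (splice r.1), r.2.map (fun sp => sp.2.1), r.1)

-- ===== PRECONDITION & SPEC =====

-- Closed-form well-formedness of the input's bracket shape (a Dyck-language condition: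
-- every ")" token has a matching open, every phrase open "(x" has an enclosing open fact
-- "(F…", no empty token, no lone "("). Like any balanced-parenthesis condition it is
-- stated as a fold over the tokens carrying only the is-fact flags of the open brackets;
-- it computes nothing from either port and no output values.
def preOk : List String → List Bool → Bool
  | [], _ => true
  | item :: rest, stk =>
    match item.toList with
    | [] => false                                -- item[0] raises
    | c :: cs =>
      if c = '(' then
        match cs with
        | [] => false                            -- item[1] raises
        | c1 :: _ =>
          if c1 = 'F' then preOk rest (true :: stk)
          else stk.contains true && preOk rest (false :: stk)
      else if c = ')' then
        match stk with
        | [] => false                            -- pop of empty stack raises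
        | _ :: stk' => preOk rest stk'
      else preOk rest stk

-- Pre_ excludes exactly the inputs where Python A raises an IndexError: an empty token,
-- a lone "(", a close token with no open bracket, or a phrase start with no open fact.
def Pre_eva_highlight (line : List String) : Prop := preOk line [] = true
instance (line : List String) : Decidable (Pre_eva_highlight line) := by unfold Pre_eva_highlight; infer_instance

def pvWitness_eva_highlight : List String := ["(Ffact1", "The", "(obj", "cat", ")", "sat", ")", "*ref", "down"]

def Spec_eva_highlight (line : List String) (out : List (List String) × List String × List String) : Prop := out = eva_highlight_alt line
instance (line : List String) (out : List (List String) × List String × List String) : Decidable (Spec_eva_highlight line out) := by unfold Spec_eva_highlight; infer_instance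

-- ===== CLAIM (what is proved, stated in full; the proofs are below) =====
def Claim_equal_eva_highlight : Prop := ∀ (line : List String), Dom_eva_highlight line → Pre_eva_highlight line → Spec_eva_highlight line (eva_highlight line)

-- ===== LEMMAS AND PROOFS =====

-- The simulation invariant tying A's loop state to B's loop state after the same prefix.
-- `openIdx` is the (ghost) list of original line positions of the spans, in start order.
structure SimInv (i : Nat) (tokens : List (List String)) (names factS : List String)
    (idS : List Nat) (typeS : List String) (only : List String)
    (spans : List (Nat × String × Option Nat)) (stack : List (Nat × Bool))
    (facts : List String) (openIdx : List Nat) : Prop where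
  hNlen : names.length = i
  hOlen : openIdx.length = spans.length
  hMono : openIdx.Pairwise (· < ·)
  hLt : ∀ x ∈ openIdx, x < i
  hSpan : ∀ (m j : Nat), openIdx[m]? = some j →
    ∃ sp, spans[m]? = some sp ∧ names[j]? = some sp.2.1 ∧ tokens[j]? = some (splice only sp)
  hBlank : ∀ j, j < i → j ∉ openIdx → names[j]? = some ""
  hPlain : ∀ j, j < tokens.length → j ∉ openIdx → tokens[j]? = some only
  hId : idS = stack.map (fun p => openIdx.getD p.1 0)
  hType : typeS = stack.map (fun p => if p.2 then "fact" else "phrase")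
  hFact : factS = facts
  hStack : ∀ p ∈ stack, p.1 < spans.length ∧ ∀ sp, spans[p.1]? = some sp → sp.2.2 = none
  hNodup : (stack.map Prod.fst).Nodup
  hBounds : ∀ sp ∈ spans, sp.1 ≤ only.length ∧ ∀ e, sp.2.2 = some e → sp.1 ≤ e ∧ e ≤ only.length
  hCount : facts.length = stack.countP (fun p => p.2)
  hNE : ∀ sp ∈ spans, sp.2.1 ≠ ""

lemma splice_append (only : List String) (x : String) (sp : Nat × String × Option Nat)
    (hs : sp.1 ≤ only.length) (he : ∀ e, sp.2.2 = some e → sp.1 ≤ e ∧ e ≤ only.length) :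
    splice (only ++ [x]) sp = splice only sp ++ [x] := by
  obtain ⟨s, n, e?⟩ := sp
  cases e? with
  | none => simp [splice, List.take_append_of_le_length hs, List.drop_append_of_le_length hs]
  | some e =>
    obtain ⟨h1, h2⟩ := he e rfl
    simp only [splice, List.take_append_of_le_length hs, List.drop_append_of_le_length hs,
      List.drop_append_of_le_length h2]
    rw [List.take_append_of_le_length (by simp [List.length_drop]; omega)]
    simp

lemma splice_close (only : List String) (s : Nat) (n : String) :
    splice only (s, n, some only.length) = splice only (s, n, none) ++ ["</strong>"] := by
  simp only [splice]
  rw [List.take_of_length_le (by simp : (only.drop s).length ≤ only.length - s), List.drop_length]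
  simp

lemma aSelect_eq_filter (ts : List (List String)) (ns : List String) :
    aSelect ts ns = (((ts.zip ns).filter (fun p => p.2 ≠ "")).map Prod.fst,
                     ((ts.zip ns).filter (fun p => p.2 ≠ "")).map Prod.snd) := by
  induction ts generalizing ns with
  | nil => simp [aSelect]
  | cons t ts ih =>
    cases ns with
    | nil => simp [aSelect]
    | cons n ns =>
      simp only [aSelect, ih, List.zip_cons_cons, List.filter_cons]
      by_cases h : n = "" <;> simp [h]

lemma filter_positions {α : Type} (l : List α) (p : α → Bool) (idxs : List Nat) (vals : List α)
    (hlen : idxs.length = vals.length)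
    (hmono : idxs.Pairwise (· < ·))
    (hat : ∀ (m j : Nat), idxs[m]? = some j → ∃ v, vals[m]? = some v ∧ l[j]? = some v ∧ p v = true)
    (hblank : ∀ j, j < l.length → j ∉ idxs → ∀ v, l[j]? = some v → p v = false) :
    l.filter p = vals := by
  induction l generalizing idxs vals with
  | nil =>
    cases idxs with
    | nil => cases vals with
      | nil => simp
      | cons v vs => simp at hlen
    | cons j js =>
      obtain ⟨v, _, hv, _⟩ := hat 0 j (by simp)
      simp at hv
  | cons x l ih =>
    cases idxs with
    | nil =>
      cases vals with
      | cons v vs => simp at hlen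
      | nil =>
        have hx : p x = false := hblank 0 (by simp) (by simp) x (by simp)
        rw [List.filter_cons_of_neg (by simp [hx])]
        refine ih [] [] rfl List.Pairwise.nil (by simp) ?_
        intro j hj _ v hv
        exact hblank (j+1) (by simpa using Nat.succ_lt_succ hj) (by simp) v (by simpa using hv)
    | cons j js =>
      have hjs_pos : ∀ y ∈ js, j < y := by
        intro y hy; exact (List.pairwise_cons.mp hmono).1 y hy
      by_cases hj0 : j = 0
      · subst hj0
        obtain ⟨v, hv1, hv2, hv3⟩ := hat 0 0 (by simp)
        simp only [List.getElem?_cons_zero, Option.some.injEq] at hv2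
        subst hv2
        cases vals with
        | nil => simp at hv1
        | cons v0 vs =>
          simp only [List.getElem?_cons_zero, Option.some.injEq] at hv1
          subst hv1
          rw [List.filter_cons_of_pos (by simp [hv3])]
          congr 1
          refine ih (js.map (· - 1)) vs (by simpa using Nat.succ_injective hlen) ?_ ?_ ?_
          · rw [List.pairwise_map]
            refine (List.pairwise_cons.mp hmono).2.imp_of_mem ?_
            intro a b ha hb hab
            have := hjs_pos a ha
            omega
          · intro m j' hm
            simp only [List.getElem?_map] at hm
            cases hjm : js[m]? with
            | none => simp [hjm] at hm
            | some jm =>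
              simp only [hjm, Option.map_some, Option.some.injEq] at hm
              have hjm_pos : 0 < jm := hjs_pos jm (by exact List.mem_of_getElem? hjm)
              obtain ⟨v', hv1', hv2', hv3'⟩ := hat (m+1) jm (by simpa using hjm)
              refine ⟨v', by simpa using hv1', ?_, hv3'⟩
              rw [← hm]
              rw [show jm = (jm - 1) + 1 by omega] at hv2'
              simpa using hv2'
          · intro j' hj' hnot v hv
            refine hblank (j'+1) (by simpa using Nat.succ_lt_succ hj') ?_ v (by simpa using hv)
            simp only [List.mem_cons]
            push_neg
            refine ⟨by omega, ?_⟩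
            intro hmem
            exact hnot (by
              have : j' + 1 - 1 = j' := by omega
              exact this ▸ List.mem_map_of_mem hmem)
      · have hx : p x = false := by
          refine hblank 0 (by simp) ?_ x (by simp)
          simp only [List.mem_cons]
          push_neg
          exact ⟨fun h => hj0 h.symm, fun h => by have := hjs_pos 0 h; omega⟩
        rw [List.filter_cons_of_neg (by simp [hx])]
        refine ih ((j :: js).map (· - 1)) vals (by simpa using hlen) ?_ ?_ ?_
        · rw [List.pairwise_map]
          refine hmono.imp_of_mem ?_
          intro a b ha hb hab
          have ha' : 0 < a := by
            rcases List.mem_cons.mp ha with h | h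
            · omega
            · have := hjs_pos a h; omega
          omega
        · intro m j' hm
          simp only [List.getElem?_map] at hm
          cases hjm : (j :: js)[m]? with
          | none => simp [hjm] at hm
          | some jm =>
            simp only [hjm, Option.map_some, Option.some.injEq] at hm
            have hjm_pos : 0 < jm := by
              rcases List.mem_cons.mp (List.mem_of_getElem? hjm) with h | h
              · omega
              · have := hjs_pos jm h; omega
            obtain ⟨v', hv1', hv2', hv3'⟩ := hat m jm hjm
            refine ⟨v', hv1', ?_, hv3'⟩
            rw [← hm]
            rw [show jm = (jm - 1) + 1 by omega] at hv2'
            simpa using hv2'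
        · intro j' hj' hnot v hv
          refine hblank (j'+1) (by simpa using Nat.succ_lt_succ hj') ?_ v (by simpa using hv)
          intro hmem
          exact hnot (by
            have : j' + 1 - 1 = j' := by omega
            exact this ▸ List.mem_map_of_mem hmem)

lemma labelClassify_fact (item : String) (c1 : Char) (cs1 : List Char)
    (hcs : item.toList = '(' :: c1 :: cs1) (hF : c1 = 'F') :
    labelClassify item.toList = some "fact" := by
  subst hF; simp [labelClassify, hcs]

lemma labelClassify_phrase (item : String) (c1 : Char) (cs1 : List Char)
    (hcs : item.toList = '(' :: c1 :: cs1) (hF : c1 ≠ 'F') :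
    labelClassify item.toList = some "phrase" := by
  simp [labelClassify, hcs, hF]

lemma labelClassify_other (item : String) (c : Char) (cs : List Char)
    (hcs : item.toList = c :: cs) (h1 : c ≠ '(') :
    labelClassify item.toList =
      some (if c = ')' then "end" else if c = '*' then "reference" else "token") := by
  simp only [labelClassify, hcs]
  split_ifs <;> simp_all

lemma aLoop_fact (item : String) (rest : List String) (i : Nat) (tokens : List (List String))
    (names factS : List String) (idS : List Nat) (typeS only : List String)
    (hcl : labelClassify item.toList = some "fact") :
    aLoop (item :: rest) i tokens names factS idS typeS only =
      aLoop rest (i+1) (tokens.modify i (· ++ ["<strong>"]))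
        (names ++ [String.ofList item.toList.tail]) (String.ofList item.toList.tail :: factS)
        (i :: idS) ("fact" :: typeS) only := by
  simp [aLoop, hcl]

lemma aLoop_phrase (item : String) (rest : List String) (i : Nat) (tokens : List (List String))
    (names : List String) (f : String) (fs : List String) (idS : List Nat) (typeS only : List String)
    (hcl : labelClassify item.toList = some "phrase") :
    aLoop (item :: rest) i tokens names (f :: fs) idS typeS only =
      aLoop rest (i+1) (tokens.modify i (· ++ ["<strong>"]))
        (names ++ [f ++ "|||" ++ String.ofList item.toList.tail]) (f :: fs)
        (i :: idS) ("phrase" :: typeS) only := by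
  simp [aLoop, hcl]

lemma aLoop_end (item : String) (rest : List String) (i : Nat) (tokens : List (List String))
    (names factS : List String) (popId : Nat) (idS : List Nat) (popTy : String)
    (typeS only : List String)
    (hcl : labelClassify item.toList = some "end") :
    aLoop (item :: rest) i tokens names factS (popId :: idS) (popTy :: typeS) only =
      aLoop rest (i+1) (tokens.modify popId (· ++ ["</strong>"])) (names ++ [""])
        (if popTy = "fact" then factS.tail else factS) idS typeS only := by
  simp [aLoop, hcl]

lemma aLoop_ref (item : String) (rest : List String) (i : Nat) (tokens : List (List String))
    (names factS : List String) (idS : List Nat) (typeS only : List String)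
    (hcl : labelClassify item.toList = some "reference") :
    aLoop (item :: rest) i tokens names factS idS typeS only =
      aLoop rest (i+1) tokens (names ++ [""]) factS idS typeS only := by
  simp [aLoop, hcl]

lemma aLoop_token (item : String) (rest : List String) (i : Nat) (tokens : List (List String))
    (names factS : List String) (idS : List Nat) (typeS only : List String)
    (hcl : labelClassify item.toList = some "token") :
    aLoop (item :: rest) i tokens names factS idS typeS only =
      aLoop rest (i+1) (tokens.map (· ++ [item])) (names ++ [""]) factS idS typeS (only ++ [item]) := by
  simp [aLoop, hcl]

lemma bLoop_fact (item : String) (rest only : List String)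
    (spans : List (Nat × String × Option Nat)) (stack : List (Nat × Bool)) (facts : List String)
    (c1 : Char) (cs1 : List Char) (hcs : item.toList = '(' :: c1 :: cs1) (hF : c1 = 'F') :
    bLoop (item :: rest) only spans stack facts =
      bLoop rest only (spans ++ [(only.length, String.ofList (c1 :: cs1), none)])
        ((spans.length, true) :: stack) (String.ofList (c1 :: cs1) :: facts) := by
  subst hF; simp [bLoop, hcs]

lemma bLoop_phrase (item : String) (rest only : List String)
    (spans : List (Nat × String × Option Nat)) (stack : List (Nat × Bool)) (f : String) (fs : List String)
    (c1 : Char) (cs1 : List Char) (hcs : item.toList = '(' :: c1 :: cs1) (hF : c1 ≠ 'F') :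
    bLoop (item :: rest) only spans stack (f :: fs) =
      bLoop rest only (spans ++ [(only.length, f ++ "|||" ++ String.ofList (c1 :: cs1), none)])
        ((spans.length, false) :: stack) (f :: fs) := by
  simp [bLoop, hcs, hF]

lemma bLoop_end (item : String) (rest only : List String)
    (spans : List (Nat × String × Option Nat)) (idx : Nat) (isF : Bool)
    (stack : List (Nat × Bool)) (facts : List String)
    (cs : List Char) (hcs : item.toList = ')' :: cs) :
    bLoop (item :: rest) only spans ((idx, isF) :: stack) facts =
      bLoop rest only (spans.modify idx (fun sp => (sp.1, sp.2.1, some only.length)))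
        stack (if isF then facts.tail else facts) := by
  simp [bLoop, hcs]

lemma bLoop_ref (item : String) (rest only : List String)
    (spans : List (Nat × String × Option Nat)) (stack : List (Nat × Bool)) (facts : List String)
    (cs : List Char) (hcs : item.toList = '*' :: cs) :
    bLoop (item :: rest) only spans stack facts = bLoop rest only spans stack facts := by
  simp [bLoop, hcs]

lemma bLoop_token (item : String) (rest only : List String)
    (spans : List (Nat × String × Option Nat)) (stack : List (Nat × Bool)) (facts : List String)
    (c : Char) (cs : List Char) (hcs : item.toList = c :: cs)
    (h1 : c ≠ '(') (h2 : c ≠ ')') (h3 : c ≠ '*') :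
    bLoop (item :: rest) only spans stack facts = bLoop rest (only ++ [item]) spans stack facts := by
  simp [bLoop, hcs, h1, h2, h3]

lemma preOk_nil (item : String) (rest : List String) (stk : List Bool)
    (hcs : item.toList = []) : preOk (item :: rest) stk = false := by
  simp [preOk, hcs]

lemma preOk_lone (item : String) (rest : List String) (stk : List Bool)
    (hcs : item.toList = ['(']) : preOk (item :: rest) stk = false := by
  simp [preOk, hcs]

lemma preOk_fact (item : String) (rest : List String) (stk : List Bool) (c1 : Char) (cs1 : List Char)
    (hcs : item.toList = '(' :: c1 :: cs1) (hF : c1 = 'F') :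
    preOk (item :: rest) stk = preOk rest (true :: stk) := by
  subst hF; simp [preOk, hcs]

lemma preOk_phrase (item : String) (rest : List String) (stk : List Bool) (c1 : Char) (cs1 : List Char)
    (hcs : item.toList = '(' :: c1 :: cs1) (hF : c1 ≠ 'F') :
    preOk (item :: rest) stk = (stk.contains true && preOk rest (false :: stk)) := by
  simp [preOk, hcs, hF]

lemma preOk_end_nil (item : String) (rest : List String) (cs : List Char)
    (hcs : item.toList = ')' :: cs) : preOk (item :: rest) [] = false := by
  simp [preOk, hcs]

lemma preOk_end_cons (item : String) (rest : List String) (b : Bool) (stk : List Bool) (cs : List Char)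
    (hcs : item.toList = ')' :: cs) : preOk (item :: rest) (b :: stk) = preOk rest stk := by
  simp [preOk, hcs]

lemma preOk_other (item : String) (rest : List String) (stk : List Bool) (c : Char) (cs : List Char)
    (hcs : item.toList = c :: cs) (h1 : c ≠ '(') (h2 : c ≠ ')') :
    preOk (item :: rest) stk = preOk rest stk := by
  simp [preOk, hcs, h1, h2]

lemma simInv_blank (i : Nat) (tokens : List (List String)) (names factS : List String)
    (idS : List Nat) (typeS only : List String) (spans : List (Nat × String × Option Nat))
    (stack : List (Nat × Bool)) (facts : List String) (openIdx : List Nat)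
    (hinv : SimInv i tokens names factS idS typeS only spans stack facts openIdx) :
    SimInv (i+1) tokens (names ++ [""]) factS idS typeS only spans stack facts openIdx where
  hNlen := by simp [hinv.hNlen]
  hOlen := hinv.hOlen
  hMono := hinv.hMono
  hLt x hx := Nat.lt_succ_of_lt (hinv.hLt x hx)
  hSpan := by
    intro m j hm
    obtain ⟨sp, h1, h2, h3⟩ := hinv.hSpan m j hm
    refine ⟨sp, h1, ?_, h3⟩
    rw [List.getElem?_append_left (hinv.hNlen ▸ hinv.hLt j (List.mem_of_getElem? hm))]
    exact h2
  hBlank := by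
    intro j hj hnot
    rcases Nat.lt_succ_iff_lt_or_eq.mp hj with h | h
    · rw [List.getElem?_append_left (hinv.hNlen ▸ h)]
      exact hinv.hBlank j h hnot
    · subst h
      have hn := hinv.hNlen
      rw [← hn]
      exact List.getElem?_concat_length
  hPlain := hinv.hPlain
  hId := hinv.hId
  hType := hinv.hType
  hFact := hinv.hFact
  hStack := hinv.hStack
  hNodup := hinv.hNodup
  hBounds := hinv.hBounds
  hCount := hinv.hCount
  hNE := hinv.hNE

lemma simInv_token (i : Nat) (tokens : List (List String)) (names factS : List String)
    (idS : List Nat) (typeS only : List String) (spans : List (Nat × String × Option Nat))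
    (stack : List (Nat × Bool)) (facts : List String) (openIdx : List Nat) (item : String)
    (hinv : SimInv i tokens names factS idS typeS only spans stack facts openIdx) :
    SimInv (i+1) (tokens.map (· ++ [item])) (names ++ [""]) factS idS typeS (only ++ [item])
      spans stack facts openIdx where
  hNlen := by simp [hinv.hNlen]
  hOlen := hinv.hOlen
  hMono := hinv.hMono
  hLt x hx := Nat.lt_succ_of_lt (hinv.hLt x hx)
  hSpan := by
    intro m j hm
    obtain ⟨sp, h1, h2, h3⟩ := hinv.hSpan m j hm
    have hbd := hinv.hBounds sp (List.mem_of_getElem? h1)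
    refine ⟨sp, h1, ?_, ?_⟩
    · rw [List.getElem?_append_left (hinv.hNlen ▸ hinv.hLt j (List.mem_of_getElem? hm))]
      exact h2
    · rw [List.getElem?_map, h3, Option.map_some]
      rw [splice_append only item sp hbd.1 hbd.2]
  hBlank := by
    intro j hj hnot
    rcases Nat.lt_succ_iff_lt_or_eq.mp hj with h | h
    · rw [List.getElem?_append_left (hinv.hNlen ▸ h)]
      exact hinv.hBlank j h hnot
    · subst h
      have hn := hinv.hNlen
      rw [← hn]
      exact List.getElem?_concat_length
  hPlain := by
    intro j hj hnot
    rw [List.getElem?_map, hinv.hPlain j (by simpa using hj) hnot, Option.map_some]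
  hId := hinv.hId
  hType := hinv.hType
  hFact := hinv.hFact
  hStack := hinv.hStack
  hNodup := hinv.hNodup
  hBounds := by
    intro sp hsp
    obtain ⟨hb1, hb2⟩ := hinv.hBounds sp hsp
    refine ⟨by simp; omega, fun e he => ?_⟩
    have := hb2 e he
    simp
    omega
  hCount := hinv.hCount
  hNE := hinv.hNE

lemma simInv_open (i : Nat) (tokens : List (List String)) (names : List String)
    (idS : List Nat) (typeS only : List String) (spans : List (Nat × String × Option Nat))
    (stack : List (Nat × Bool)) (facts : List String) (openIdx : List Nat)
    (isF : Bool) (nm : String)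
    (hinv : SimInv i tokens names facts idS typeS only spans stack facts openIdx)
    (hnm : nm ≠ "") (hilt : i < tokens.length) :
    SimInv (i+1) (tokens.modify i (· ++ ["<strong>"])) (names ++ [nm])
      (if isF then nm :: facts else facts) (i :: idS)
      ((if isF then "fact" else "phrase") :: typeS) only
      (spans ++ [(only.length, nm, none)]) ((spans.length, isF) :: stack)
      (if isF then nm :: facts else facts) (openIdx ++ [i]) where
  hNlen := by simp [hinv.hNlen]
  hOlen := by simp [hinv.hOlen]
  hMono := List.pairwise_append.mpr ⟨hinv.hMono, by simp, by
    intro a ha b hb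
    simp only [List.mem_singleton] at hb
    subst hb
    exact hinv.hLt a ha⟩
  hLt := by
    intro x hx
    rcases List.mem_append.mp hx with h | h
    · exact Nat.lt_succ_of_lt (hinv.hLt x h)
    · simp only [List.mem_singleton] at h; omega
  hSpan := by
    intro m j hm
    by_cases hmlen : m < openIdx.length
    · rw [List.getElem?_append_left hmlen] at hm
      obtain ⟨sp, h1, h2, h3⟩ := hinv.hSpan m j hm
      have hji : j < i := hinv.hLt j (List.mem_of_getElem? hm)
      refine ⟨sp, ?_, ?_, ?_⟩
      · rw [List.getElem?_append_left (hinv.hOlen ▸ hmlen)]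
        exact h1
      · rw [List.getElem?_append_left (hinv.hNlen ▸ hji)]
        exact h2
      · rw [List.getElem?_modify, h3]
        have : i ≠ j := by omega
        simp [this]
    · have hmlt : m < (openIdx ++ [i]).length := (List.getElem?_eq_some_iff.mp hm).1
      have hmeq : m = openIdx.length := by simp at hmlt; omega
      subst hmeq
      rw [List.getElem?_concat_length] at hm
      have hji : j = i := by simpa using hm.symm
      subst hji
      refine ⟨(only.length, nm, none), ?_, ?_, ?_⟩
      · rw [hinv.hOlen]
        exact List.getElem?_concat_length
      · rw [← hinv.hNlen]
        exact List.getElem?_concat_length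
      · have hfree : j ∉ openIdx := fun hmem => absurd (hinv.hLt j hmem) (by omega)
        rw [List.getElem?_modify, hinv.hPlain j hilt hfree]
        simp [splice]
  hBlank := by
    intro j hj hnot
    have hji : j ≠ i := by simp at hnot; tauto
    have hjlt : j < i := by omega
    rw [List.getElem?_append_left (hinv.hNlen ▸ hjlt)]
    exact hinv.hBlank j hjlt (fun hmem => hnot (List.mem_append.mpr (Or.inl hmem)))
  hPlain := by
    intro j hj hnot
    have hji : j ≠ i := by simp at hnot; tauto
    rw [List.getElem?_modify, hinv.hPlain j (by simpa using hj)
      (fun hmem => hnot (List.mem_append.mpr (Or.inl hmem)))]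
    have : i ≠ j := fun h => hji h.symm
    simp [this]
  hId := by
    rw [List.map_cons]
    congr 1
    · rw [List.getD_eq_getElem?_getD, ← hinv.hOlen, List.getElem?_concat_length]
      rfl
    · rw [hinv.hId]
      apply List.map_congr_left
      intro p hp
      have hlt : p.1 < openIdx.length := hinv.hOlen ▸ (hinv.hStack p hp).1
      simp only [List.getD_eq_getElem?_getD]
      rw [List.getElem?_append_left hlt]
  hType := by rw [List.map_cons, hinv.hType]
  hFact := rfl
  hStack := by
    intro p hp
    rcases List.mem_cons.mp hp with h | h
    · subst h
      refine ⟨by simp, ?_⟩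
      intro sp hsp
      rw [List.getElem?_concat_length] at hsp
      simp only [Option.some.injEq] at hsp
      rw [← hsp]
    · obtain ⟨hlt, hend⟩ := hinv.hStack p h
      refine ⟨by simp; omega, ?_⟩
      intro sp hsp
      rw [List.getElem?_append_left hlt] at hsp
      exact hend sp hsp
  hNodup := by
    rw [List.map_cons]
    refine List.nodup_cons.mpr ⟨?_, hinv.hNodup⟩
    intro hmem
    obtain ⟨p, hp, hp1⟩ := List.mem_map.mp hmem
    have := (hinv.hStack p hp).1
    omega
  hBounds := by
    intro sp hsp
    rcases List.mem_append.mp hsp with h | h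
    · exact hinv.hBounds sp h
    · simp only [List.mem_singleton] at h
      subst h
      exact ⟨le_refl _, by simp⟩
  hCount := by
    cases isF <;> simp [hinv.hCount]
  hNE := by
    intro sp hsp
    rcases List.mem_append.mp hsp with h | h
    · exact hinv.hNE sp h
    · simp only [List.mem_singleton] at h
      subst h
      exact hnm

lemma main_sim (items : List String) (i : Nat) (tokens : List (List String))
    (names factS : List String) (idS : List Nat) (typeS : List String) (only : List String)
    (spans : List (Nat × String × Option Nat)) (stack : List (Nat × Bool))
    (facts : List String) (openIdx : List Nat)
    (hpre : preOk items (stack.map Prod.snd) = true)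
    (htot : i + items.length = tokens.length)
    (hinv : SimInv i tokens names factS idS typeS only spans stack facts openIdx) :
    (aLoop items i tokens names factS idS typeS only).2.2 = (bLoop items only spans stack facts).1 ∧
    aSelect (aLoop items i tokens names factS idS typeS only).1
            (aLoop items i tokens names factS idS typeS only).2.1 =
      ((bLoop items only spans stack facts).2.map (splice (bLoop items only spans stack facts).1),
       (bLoop items only spans stack facts).2.map (fun sp => sp.2.1)) := by
  induction items generalizing i tokens names factS idS typeS only spans stack facts openIdx with
  | nil =>
    refine ⟨rfl, ?_⟩
    simp only [aLoop, bLoop]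
    rw [aSelect_eq_filter]
    have hfilter : (tokens.zip names).filter (fun p => !decide (p.2 = ""))
        = spans.map (fun sp => (splice only sp, sp.2.1)) := by
      apply filter_positions _ _ openIdx
      · simpa using hinv.hOlen
      · exact hinv.hMono
      · intro m j hm
        obtain ⟨sp, h1, h2, h3⟩ := hinv.hSpan m j hm
        refine ⟨(splice only sp, sp.2.1), by simp [List.getElem?_map, h1],
          List.getElem?_zip_eq_some.mpr ⟨h3, h2⟩, by
            simpa using hinv.hNE sp (List.mem_of_getElem? h1)⟩
      · intro j hj hnot v hv
        obtain ⟨hv1, hv2⟩ := List.getElem?_zip_eq_some.mp hv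
        have hji : j < i := by
          obtain ⟨hlt, -⟩ := List.getElem?_eq_some_iff.mp hv2
          have := hinv.hNlen
          omega
        have := hinv.hBlank j hji hnot
        rw [hv2] at this
        simp only [Option.some.injEq] at this
        simp [this]
    simp [hfilter, List.map_map, Function.comp_def]
  | cons item rest ih =>
    cases hcs : item.toList with
    | nil => rw [preOk_nil item rest _ hcs] at hpre; exact absurd hpre (by simp)
    | cons c cs =>
      by_cases hc1 : c = '('
      · subst hc1
        cases cs with
        | nil => rw [preOk_lone item rest _ hcs] at hpre; exact absurd hpre (by simp)
        | cons c1 cs1 =>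
          by_cases hF : c1 = 'F'
          · -- fact start
            subst hF
            rw [preOk_fact item rest _ 'F' cs1 hcs rfl] at hpre
            have htl : item.toList.tail = 'F' :: cs1 := by simp [hcs]
            rw [aLoop_fact _ _ _ _ _ _ _ _ _ (labelClassify_fact item 'F' cs1 hcs rfl),
              bLoop_fact _ _ _ _ _ _ 'F' cs1 hcs rfl, htl, hinv.hFact]
            have hilt : i < tokens.length := by simp at htot; omega
            apply ih _ _ _ _ _ _ _ _ _ _ (openIdx ++ [i]) (by simpa using hpre)
              (by simp at htot ⊢; omega)
            exact simInv_open i tokens names idS typeS only spans stack facts openIdx true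
              (String.ofList ('F' :: cs1)) (hinv.hFact ▸ hinv)
              (by intro h; have := congrArg String.toList h; simp at this) hilt
          · -- phrase start
            rw [preOk_phrase item rest _ c1 cs1 hcs hF] at hpre
            rw [Bool.and_eq_true] at hpre
            obtain ⟨hcont, hpre'⟩ := hpre
            have hfne : facts ≠ [] := by
              have h1 : true ∈ stack.map Prod.snd := by
                simpa using hcont
              obtain ⟨p, hp, hp2⟩ := List.mem_map.mp h1
              have : 0 < stack.countP (fun p => p.2) :=
                List.countP_pos_iff.mpr ⟨p, hp, by simp [hp2]⟩
              intro h
              rw [← hinv.hCount] at this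
              simp [h] at this
            obtain ⟨f, fs, hfacts⟩ : ∃ f fs, facts = f :: fs := by
              cases facts with
              | nil => exact absurd rfl hfne
              | cons f fs => exact ⟨f, fs, rfl⟩
            subst hfacts
            have htl : item.toList.tail = c1 :: cs1 := by simp [hcs]
            rw [hinv.hFact, aLoop_phrase _ _ _ _ _ _ _ _ _ _
                (labelClassify_phrase item c1 cs1 hcs hF),
              bLoop_phrase _ _ _ _ _ _ _ c1 cs1 hcs hF, htl]
            have hilt : i < tokens.length := by simp at htot; omega
            apply ih _ _ _ _ _ _ _ _ _ _ (openIdx ++ [i]) (by simpa using hpre')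
              (by simp at htot ⊢; omega)
            exact simInv_open i tokens names idS typeS only spans stack (f :: fs) openIdx false
              (f ++ "|||" ++ String.ofList (c1 :: cs1)) (hinv.hFact ▸ hinv)
              (by intro h; have := congrArg String.toList h; simp at this) hilt
      · by_cases hc2 : c = ')'
        · -- close
          subst hc2
          cases stack with
          | nil =>
            rw [show (List.map Prod.snd ([] : List (Nat × Bool))) = [] by simp,
              preOk_end_nil item rest cs hcs] at hpre
            exact absurd hpre (by simp)
          | cons p st' =>
            obtain ⟨idx, isF⟩ := p
            rw [show (((idx, isF) :: st').map Prod.snd) = isF :: st'.map Prod.snd by simp,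
              preOk_end_cons item rest _ _ cs hcs] at hpre
            have hidxlt : idx < spans.length := (hinv.hStack (idx, isF) (by simp)).1
            have hidxlt' : idx < openIdx.length := by rw [hinv.hOlen]; exact hidxlt
            have hpopId : openIdx[idx]? = some (openIdx.getD idx 0) := by
              rw [List.getD_eq_getElem?_getD, List.getElem?_eq_getElem hidxlt']
              simp
            rw [hinv.hId, hinv.hType]
            simp only [List.map_cons]
            rw [aLoop_end _ _ _ _ _ _ _ _ _ _ _
                ((labelClassify_other item ')' cs hcs (by decide)).trans (by simp)),
              bLoop_end _ _ _ _ _ _ _ _ cs hcs]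
            have hfcase : (if (if isF then "fact" else "phrase") = "fact" then factS.tail else factS)
                = (if isF then facts.tail else facts) := by
              cases isF <;> simp [hinv.hFact]
            rw [hfcase]
            apply ih _ _ _ _ _ _ _ _ _ _ openIdx hpre (by simp at htot ⊢; omega)
            have hnotin : idx ∉ st'.map Prod.fst := by
              have := hinv.hNodup
              simp only [List.map_cons] at this
              exact (List.nodup_cons.mp this).1
            refine
              { hNlen := by simp [hinv.hNlen]
                hOlen := by simpa using hinv.hOlen
                hMono := hinv.hMono
                hLt := fun x hx => Nat.lt_succ_of_lt (hinv.hLt x hx)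
                hSpan := ?_, hBlank := ?_, hPlain := ?_
                hId := rfl, hType := rfl, hFact := rfl
                hStack := ?_
                hNodup := by
                  have := hinv.hNodup
                  simp only [List.map_cons] at this
                  exact (List.nodup_cons.mp this).2
                hBounds := ?_
                hCount := ?_
                hNE := ?_ }
            · -- hSpan
              intro m j hm
              obtain ⟨sp, h1, h2, h3⟩ := hinv.hSpan m j hm
              have hji : j < i := hinv.hLt j (List.mem_of_getElem? hm)
              have hnames : (names ++ [""])[j]? = some sp.2.1 := by
                rw [List.getElem?_append_left (hinv.hNlen ▸ hji)]; exact h2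
              by_cases hmi : m = idx
              · subst hmi
                have hj : openIdx.getD m 0 = j := Option.some.inj (hpopId.symm.trans hm)
                have hend := (hinv.hStack (m, isF) (by simp)).2 sp h1
                obtain ⟨s0, n0, e0⟩ := sp
                simp only at hend
                subst hend
                refine ⟨(s0, n0, some only.length), ?_, hnames, ?_⟩
                · rw [List.getElem?_modify, h1]; simp
                · rw [List.getElem?_modify, h3, hj]
                  simp [splice_close]
              · have hmlt : m < openIdx.length := by
                  obtain ⟨h, -⟩ := List.getElem?_eq_some_iff.mp hm
                  exact h
                have hj : openIdx.getD idx 0 ≠ j := by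
                  intro h
                  have h2 := List.getElem?_inj hmlt hinv.hMono.nodup
                    (hm.trans (h ▸ hpopId).symm)
                  omega
                have hne2 : ¬ (idx = m) := fun h => hmi h.symm
                refine ⟨sp, ?_, hnames, ?_⟩
                · rw [List.getElem?_modify, h1]
                  simp [hne2]
                · rw [List.getElem?_modify, h3]
                  have hj' : openIdx[idx]?.getD 0 ≠ j := hj
                  simp [hj']
            · -- hBlank
              intro j hj hnot
              rcases Nat.lt_succ_iff_lt_or_eq.mp hj with h | h
              · rw [List.getElem?_append_left (hinv.hNlen ▸ h)]
                exact hinv.hBlank j h hnot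
              · subst h
                have hn := hinv.hNlen
                rw [← hn]
                exact List.getElem?_concat_length
            · -- hPlain
              intro j hj hnot
              have hj2 : openIdx.getD idx 0 ≠ j := by
                intro h
                exact hnot (h ▸ List.mem_of_getElem? hpopId)
              rw [List.getElem?_modify, hinv.hPlain j (by simpa using hj) hnot]
              have hj2' : openIdx[idx]?.getD 0 ≠ j := hj2
              simp [hj2']
            · -- hStack
              intro p hp
              obtain ⟨hlt, hend⟩ := hinv.hStack p (List.mem_cons_of_mem _ hp)
              have hne : idx ≠ p.1 := fun h => hnotin (h ▸ List.mem_map_of_mem hp)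
              refine ⟨by simpa using hlt, ?_⟩
              intro sp hsp
              cases hsm : spans[p.1]? with
              | none => rw [List.getElem?_modify, hsm] at hsp; simp at hsp
              | some sp0 =>
                rw [List.getElem?_modify, hsm] at hsp
                simp [hne] at hsp
                subst hsp
                exact hend sp0 hsm
            · -- hBounds
              intro sp' hsp'
              obtain ⟨m, hm⟩ := List.mem_iff_getElem?.mp hsp'
              rw [List.getElem?_modify] at hm
              cases hsm : spans[m]? with
              | none => rw [hsm] at hm; simp at hm
              | some sp0 =>
                rw [hsm] at hm
                obtain ⟨hb1, hb2⟩ := hinv.hBounds sp0 (List.mem_of_getElem? hsm)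
                by_cases hmi : idx = m
                · simp [hmi] at hm
                  subst hm
                  refine ⟨hb1, fun e he => ?_⟩
                  simp only [Option.some.injEq] at he
                  subst he
                  exact ⟨hb1, le_refl _⟩
                · simp [hmi] at hm
                  subst hm
                  exact ⟨hb1, hb2⟩
            · -- hCount
              have hc := hinv.hCount
              rw [List.countP_cons] at hc
              cases isF
              · simpa using hc
              · simp at hc ⊢
                omega
            · -- hNE
              intro sp' hsp'
              obtain ⟨m, hm⟩ := List.mem_iff_getElem?.mp hsp'
              rw [List.getElem?_modify] at hm
              cases hsm : spans[m]? with
              | none => rw [hsm] at hm; simp at hm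
              | some sp0 =>
                rw [hsm] at hm
                have hne := hinv.hNE sp0 (List.mem_of_getElem? hsm)
                by_cases hmi : idx = m
                · simp [hmi] at hm
                  subst hm
                  exact hne
                · simp [hmi] at hm
                  subst hm
                  exact hne
        · by_cases hc3 : c = '*'
          · -- reference
            subst hc3
            rw [preOk_other item rest _ '*' cs hcs (by decide) (by decide)] at hpre
            rw [aLoop_ref _ _ _ _ _ _ _ _ _
                ((labelClassify_other item '*' cs hcs (by decide)).trans (by simp)),
              bLoop_ref _ _ _ _ _ _ cs hcs]
            apply ih _ _ _ _ _ _ _ _ _ _ openIdx hpre (by simp at htot ⊢; omega)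
            exact simInv_blank i tokens names factS idS typeS only spans stack facts openIdx hinv
          · -- plain token
            rw [preOk_other item rest _ c cs hcs hc1 hc2] at hpre
            rw [aLoop_token _ _ _ _ _ _ _ _ _
                ((labelClassify_other item c cs hcs hc1).trans (by simp [hc2, hc3])),
              bLoop_token _ _ _ _ _ _ c cs hcs hc1 hc2 hc3]
            apply ih _ _ _ _ _ _ _ _ _ _ openIdx hpre (by simp at htot ⊢; omega)
            exact simInv_token i tokens names factS idS typeS only spans stack facts openIdx item hinv

-- ===== VERDICT (by name: the statement is the Claim_ definition above) =====
theorem eva_highlight_spec : Claim_equal_eva_highlight := by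
  intro line _ hpre
  have h := main_sim line 0 (line.map fun _ => ([] : List String)) [] [] [] [] [] [] [] [] []
    (by simpa using hpre) (by simp)
    { hNlen := rfl
      hOlen := rfl
      hMono := List.Pairwise.nil
      hLt := by simp
      hSpan := by simp
      hBlank := by simp
      hPlain := by intro j hj _; simp only [List.length_map] at hj; simp [hj]
      hId := rfl
      hType := rfl
      hFact := rfl
      hStack := by simp
      hNodup := List.nodup_nil
      hBounds := by simp
      hCount := rfl
      hNE := by simp }
  obtain ⟨h1, h2⟩ := h
  unfold Spec_eva_highlight eva_highlight eva_highlight_alt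
  simp only [h1, h2]
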